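-- pv_equiv track=rewrite | github.com/gavinjblair/multi-modal-ai-assistant | backend/app/services/vlm_service.py | _ensure_safety
-- ===== SOURCE A (Python) =====
-- def _clean_text(text: str) -> str:
--     return " ".join(text.split())
--
-- def _ensure_safety(answer: str) -> str:
--     required = ["Hazards:", "Recommended PPE/actions:", "Unknowns:"]
--     lowered = answer.lower()
--     if all(section.lower() in lowered for section in required):
--         return _normalize_section_bullets(answer, ["Hazards:", "Recommended PPE/actions:", "Unknowns:"])
--     cleaned = _clean_text(answer)
--     hazard_text = cleaned[:140] if cleaned else "Potential hazards visible in the scene."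
--     return (
--         "Hazards:\n"
--         f"- {hazard_text} (Severity: Medium)\n"
--         "Recommended PPE/actions:\n"
--         "- Follow site PPE and keep a safe distance.\n"
--         "Unknowns:\n"
--         "- Hazards outside the frame or not visible."
--     )
--
-- def _normalize_section_bullets(text: str, sections: list[str]) -> str:
--     lines = text.splitlines()
--     current_section = None
--     output_lines: list[str] = []
--     section_set = {section.lower(): section for section in sections}
--
--     def is_section(line: str) -> str | None:
--         trimmed = line.strip()
--         for section in sections:
--             if trimmed.lower().startswith(section.lower()):
--                 return section
--         return None
--
--     for line in lines:
--         section = is_section(line)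
--         if section:
--             current_section = section
--             output_lines.append(section)
--             continue
--
--         if current_section:
--             stripped = line.strip()
--             if not stripped:
--                 continue
--             if stripped.startswith(("-", "*")):
--                 output_lines.append(f"- {stripped.lstrip('-* ').strip()}")
--             else:
--                 output_lines.append(f"- {stripped}")
--         else:
--             output_lines.append(line)
--
--     # Ensure each section has at least one bullet line
--     normalized: list[str] = []
--     i = 0
--     while i < len(output_lines):
--         line = output_lines[i]
--         normalized.append(line)
--         if line in sections:
--             next_line = output_lines[i + 1] if i + 1 < len(output_lines) else ""
--             if not next_line.strip().startswith("-"):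
--                 normalized.append("- Not specified.")
--         i += 1
--
--     return "\n".join(normalized)
-- ===== SOURCE B (Python) =====
-- def _ensure_safety(answer: str) -> str:
--     sections = ["Hazards:", "Recommended PPE/actions:", "Unknowns:"]
--     lowered = answer.lower()
--     if not all(s.lower() in lowered for s in sections):
--         cleaned = " ".join(answer.split())
--         hazard_text = cleaned[:140] if cleaned else "Potential hazards visible in the scene."
--         return (
--             "Hazards:\n"
--             f"- {hazard_text} (Severity: Medium)\n"
--             "Recommended PPE/actions:\n"
--             "- Follow site PPE and keep a safe distance.\n"
--             "Unknowns:\n"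
--             "- Hazards outside the frame or not visible."
--         )
--     # One streaming pass: emit headers/bullets as they come, padding a
--     # bullet-less section with "- Not specified." as soon as it closes.
--     out: list[str] = []
--     in_section = False
--     has_bullet = True
--     for line in answer.splitlines():
--         trimmed = line.strip()
--         header = next((s for s in sections if trimmed.lower().startswith(s.lower())), None)
--         if header is not None:
--             if in_section and not has_bullet:
--                 out.append("- Not specified.")
--             out.append(header)
--             in_section = True
--             has_bullet = False
--         elif in_section:
--             if trimmed:
--                 out.append("- " + trimmed.lstrip("-* ").strip())
--                 has_bullet = True
--         else:
--             out.append(line)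
--     if in_section and not has_bullet:
--         out.append("- Not specified.")
--     return "\n".join(out)
-- ===== Notes on version B (the rewrite author's own statement) =====
-- stated objective: simpler
-- what changed: The two-phase normalization (build an intermediate output_lines list, then re-scan it with an index/lookahead loop to pad bullet-less sections) is replaced by one streaming pass over the lines that keeps a section-open/has-bullet flag and flushes '- Not specified.' when a section closes, removing the second scan and the intermediate list.
import Mathlib
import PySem

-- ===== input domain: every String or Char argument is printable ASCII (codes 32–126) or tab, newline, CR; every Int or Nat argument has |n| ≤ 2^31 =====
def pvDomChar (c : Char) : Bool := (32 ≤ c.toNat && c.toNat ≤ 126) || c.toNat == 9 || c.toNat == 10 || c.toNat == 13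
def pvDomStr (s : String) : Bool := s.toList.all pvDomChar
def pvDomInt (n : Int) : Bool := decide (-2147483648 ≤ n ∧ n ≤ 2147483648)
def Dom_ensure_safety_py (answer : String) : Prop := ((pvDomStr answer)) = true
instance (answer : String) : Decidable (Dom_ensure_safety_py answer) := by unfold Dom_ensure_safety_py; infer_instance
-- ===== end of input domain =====

-- B replaces A's two-phase normalization (intermediate list + index/lookahead re-scan that pads
-- bullet-less sections) by a single streaming pass with a section-open/has-bullet flag: simpler.

-- ===== PORT A =====
-- the literal list ["Hazards:", "Recommended PPE/actions:", "Unknowns:"]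
def pvSectionsA : List (List Char) :=
  ["Hazards:".toList, "Recommended PPE/actions:".toList, "Unknowns:".toList]

-- "- Not specified."
def pvNotSpecA : List Char := "- Not specified.".toList

-- the character set of .lstrip('-* ')
def pvBulletCharsA (c : Char) : Bool := c == '-' || c == '*' || c == ' '

-- helper is_section: first section whose lowered text prefixes the lowered trimmed line
def pvIsSectionA (line : List Char) : Option (List Char) :=
  let trimmed := PySem.Chars.strip line
  pvSectionsA.find? (fun s => PySem.Chars.startswith (PySem.Chars.lower trimmed) (PySem.Chars.lower s))

-- first loop of _normalize_section_bullets: build output_lines (current_section tested for truthiness)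
def pvPass1A (currentSection : Option (List Char)) (lines : List (List Char)) : List (List Char) :=
  match lines with
  | [] => []
  | line :: rest =>
    match pvIsSectionA line with
    | some s => s :: pvPass1A (some s) rest
    | none =>
      if currentSection.getD [] ≠ [] then      -- Python truthiness of Optional[str]
        let stripped := PySem.Chars.strip line
        if stripped = [] then pvPass1A currentSection rest
        else if PySem.Chars.startswith stripped ['-'] || PySem.Chars.startswith stripped ['*'] then
          ('-' :: ' ' :: PySem.Chars.strip (stripped.dropWhile pvBulletCharsA)) :: pvPass1A currentSection rest
        else ('-' :: ' ' :: stripped) :: pvPass1A currentSection rest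
      else line :: pvPass1A currentSection rest

-- second loop: pad each section header not followed by a "-" line (output_lines[i+1] or "")
def pvPass2A (outputLines : List (List Char)) : List (List Char) :=
  match outputLines with
  | [] => []
  | line :: rest =>
    if line ∈ pvSectionsA then
      if PySem.Chars.startswith (PySem.Chars.strip (rest.headD [])) ['-'] then
        line :: pvPass2A rest
      else
        line :: pvNotSpecA :: pvPass2A rest
    else line :: pvPass2A rest

-- _clean_text
def pvCleanTextA (text : List Char) : List Char :=
  PySem.Chars.join [' '] (PySem.Chars.split₀ text)

def ensure_safety_py (answer : String) : String :=
  let lowered := PySem.Chars.lower answer.toList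
  if pvSectionsA.all (fun s => PySem.Chars.isIn (PySem.Chars.lower s) lowered) then
    String.ofList (PySem.Chars.join ['\n']
      (pvPass2A (pvPass1A none (PySem.Chars.splitlines answer.toList))))
  else
    let cleaned := pvCleanTextA answer.toList
    let hazardText :=
      if cleaned ≠ [] then PySem.Chars.slice cleaned none (some 140)
      else "Potential hazards visible in the scene.".toList
    String.ofList ("Hazards:\n- ".toList ++ hazardText ++
      " (Severity: Medium)\nRecommended PPE/actions:\n- Follow site PPE and keep a safe distance.\nUnknowns:\n- Hazards outside the frame or not visible.".toList)

-- ===== PORT B =====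
def pvSectionsB : List (List Char) :=
  ["Hazards:".toList, "Recommended PPE/actions:".toList, "Unknowns:".toList]

def pvNotSpecB : List Char := "- Not specified.".toList

def pvBulletCharsB (c : Char) : Bool := c == '-' || c == '*' || c == ' '

-- the single streaming pass: flags (in_section, has_bullet); flushes "- Not specified."
-- when a bullet-less section closes (at the next header or at end of input)
def pvLoopB (inSection hasBullet : Bool) (lines : List (List Char)) : List (List Char) :=
  match lines with
  | [] => if inSection && !hasBullet then [pvNotSpecB] else []
  | line :: rest =>
    let trimmed := PySem.Chars.strip line
    match pvSectionsB.find? (fun s =>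
        PySem.Chars.startswith (PySem.Chars.lower trimmed) (PySem.Chars.lower s)) with
    | some header =>
      (if inSection && !hasBullet then [pvNotSpecB] else []) ++ header :: pvLoopB true false rest
    | none =>
      if inSection then
        if trimmed = [] then pvLoopB inSection hasBullet rest
        else ('-' :: ' ' :: PySem.Chars.strip (trimmed.dropWhile pvBulletCharsB)) :: pvLoopB inSection true rest
      else line :: pvLoopB inSection hasBullet rest

def ensure_safety_py_alt (answer : String) : String :=
  let lowered := PySem.Chars.lower answer.toList
  if !(pvSectionsB.all (fun s => PySem.Chars.isIn (PySem.Chars.lower s) lowered)) then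
    let cleaned := PySem.Chars.join [' '] (PySem.Chars.split₀ answer.toList)
    let hazardText :=
      if cleaned ≠ [] then PySem.Chars.slice cleaned none (some 140)
      else "Potential hazards visible in the scene.".toList
    String.ofList ("Hazards:\n- ".toList ++ hazardText ++
      " (Severity: Medium)\nRecommended PPE/actions:\n- Follow site PPE and keep a safe distance.\nUnknowns:\n- Hazards outside the frame or not visible.".toList)
  else
    String.ofList (PySem.Chars.join ['\n']
      (pvLoopB false true (PySem.Chars.splitlines answer.toList)))

-- ===== PRECONDITION & SPEC =====
def Spec_ensure_safety_py (answer : String) (out : String) : Prop := out = ensure_safety_py_alt answer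
instance (answer : String) (out : String) : Decidable (Spec_ensure_safety_py answer out) := by unfold Spec_ensure_safety_py; infer_instance

-- ===== CLAIM (what is proved, stated in full; the proofs are below) =====
def Claim_equal_ensure_safety_py : Prop := ∀ (answer : String), Dom_ensure_safety_py answer → Spec_ensure_safety_py answer (ensure_safety_py answer)

-- ===== LEMMAS AND PROOFS =====

-- B's find? is A's is_section, definitionally
lemma pvFind_eq_isSection (line : List Char) :
    pvSectionsB.find? (fun s =>
      PySem.Chars.startswith (PySem.Chars.lower (PySem.Chars.strip line)) (PySem.Chars.lower s))
      = pvIsSectionA line := rfl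

-- a line is_section sends to none is not literally one of the sections
lemma not_mem_of_isSection_none {line : List Char} (h : pvIsSectionA line = none) :
    line ∉ pvSectionsA := by
  intro hm
  simp only [pvSectionsA, List.mem_cons, List.not_mem_nil, or_false] at hm
  rcases hm with hm | hm | hm <;> subst hm <;> exact absurd h (by decide)

lemma mem_of_isSection_some {line s : List Char} (h : pvIsSectionA line = some s) :
    s ∈ pvSectionsA := by
  unfold pvIsSectionA at h
  exact List.mem_of_find?_eq_some h

-- the three section literals: nonempty, strip-fixed, members, and do not start with '-'
lemma section_props {s : List Char} (hs : s ∈ pvSectionsA) :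
    s ≠ [] ∧ PySem.Chars.strip s = s ∧
      PySem.Chars.startswith (PySem.Chars.strip s) ['-'] = false := by
  simp only [pvSectionsA, List.mem_cons, List.not_mem_nil, or_false] at hs
  rcases hs with hs | hs | hs <;> subst hs <;> exact ⟨by decide, by decide, by decide⟩

-- a bullet line '-' :: ' ' :: x is never a section literal
lemma bullet_not_mem (x : List Char) : ('-' :: ' ' :: x) ∉ pvSectionsA := by
  simp [pvSectionsA]

-- dropWhile over l ++ [a] with p a = false keeps the final a
lemma dropWhile_append_last {p : Char → Bool} {a : Char} (ha : p a = false) :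
    ∀ l : List Char, ∃ m, List.dropWhile p (l ++ [a]) = m ++ [a] := by
  intro l
  induction l with
  | nil => exact ⟨[], by simp [ha]⟩
  | cons b t ih =>
    by_cases hb : p b = true
    · obtain ⟨m, hm⟩ := ih
      exact ⟨m, by simpa [hb] using hm⟩
    · exact ⟨b :: t, by simp [hb]⟩

-- strip of a list starting with '-' still starts with '-'
lemma startswith_strip_dash (cs : List Char) :
    PySem.Chars.startswith (PySem.Chars.strip ('-' :: cs)) ['-'] = true := by
  have hd : PySem.Chars.isspace '-' = false := by decide
  have hl : PySem.Chars.lstrip ('-' :: cs) = '-' :: cs := by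
    simp [PySem.Chars.lstrip, hd]
  obtain ⟨m, hm⟩ := dropWhile_append_last (p := PySem.Chars.isspace) hd cs.reverse
  simp only [PySem.Chars.strip, hl, PySem.Chars.rstrip, List.reverse_cons, hm]
  simp [PySem.Chars.startswith, List.isPrefixOf]

-- rstrip keeps a prefix of its argument
lemma rstrip_prefix (y : List Char) : PySem.Chars.rstrip y <+: y := by
  have h2 := List.reverse_prefix.mpr
    (List.dropWhile_suffix (l := y.reverse) PySem.Chars.isspace)
  simpa [PySem.Chars.rstrip] using h2

-- head of a nonempty strip is not whitespace
lemma strip_head_not_space {line : List Char} {c : Char} {cs : List Char}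
    (h : PySem.Chars.strip line = c :: cs) : PySem.Chars.isspace c = false := by
  have hp : (c :: cs) <+: PySem.Chars.lstrip line := by
    have := rstrip_prefix (PySem.Chars.lstrip line)
    rwa [show PySem.Chars.rstrip (PySem.Chars.lstrip line) = PySem.Chars.strip line from rfl,
      h] at this
  obtain ⟨t, ht⟩ := hp
  have ht' : List.dropWhile PySem.Chars.isspace line = c :: (cs ++ t) := by
    simpa [PySem.Chars.lstrip] using ht.symm
  have hw : List.dropWhile PySem.Chars.isspace line ≠ [] := by simp [ht']
  have hnp := List.head_dropWhile_not PySem.Chars.isspace hw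
  have hc : (List.dropWhile PySem.Chars.isspace line).head hw = c := by simp [ht']
  rwa [hc] at hnp

-- rstrip of a list with a non-space last element is the list itself
lemma rstrip_eq_self_of {a : Char} (m : List Char) (ha : PySem.Chars.isspace a = false) :
    PySem.Chars.rstrip (m ++ [a]) = m ++ [a] := by
  simp [PySem.Chars.rstrip, ha]

-- last of a nonempty strip is not whitespace
lemma strip_last_not_space {line : List Char} {a : Char}
    (h : (PySem.Chars.strip line).getLast? = some a) : PySem.Chars.isspace a = false := by
  have hrev : (PySem.Chars.strip line).reverse
      = List.dropWhile PySem.Chars.isspace (PySem.Chars.lstrip line).reverse := by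
    simp [PySem.Chars.strip, PySem.Chars.rstrip]
  have hh : (List.dropWhile PySem.Chars.isspace (PySem.Chars.lstrip line).reverse).head? = some a := by
    rw [← hrev, List.head?_reverse]; exact h
  have hne : List.dropWhile PySem.Chars.isspace (PySem.Chars.lstrip line).reverse ≠ [] := by
    intro hnil; rw [hnil] at hh; simp at hh
  have hnp := List.head_dropWhile_not PySem.Chars.isspace hne
  rw [List.head?_eq_some_head hne, Option.some_inj] at hh
  rwa [hh] at hnp

-- strip is idempotent
lemma strip_idem (l : List Char) : PySem.Chars.strip (PySem.Chars.strip l) = PySem.Chars.strip l := by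
  cases e : PySem.Chars.strip l with
  | nil => rfl
  | cons c cs =>
    have hhead := strip_head_not_space e
    obtain ⟨m, a, hma⟩ : ∃ m a, c :: cs = m ++ [a] := by
      have := List.dropLast_append_getLast (l := c :: cs) (by simp)
      exact ⟨(c :: cs).dropLast, (c :: cs).getLast (by simp), this.symm⟩
    have hlasts : (PySem.Chars.strip l).getLast? = some a := by
      rw [e, hma]; simp
    have hlast := strip_last_not_space hlasts
    show PySem.Chars.rstrip (PySem.Chars.lstrip (c :: cs)) = c :: cs
    rw [show PySem.Chars.lstrip (c :: cs) = c :: cs by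
      simp [PySem.Chars.lstrip, hhead]]
    rw [hma]
    exact rstrip_eq_self_of m hlast

-- A's bullet in the non-'-*' branch equals B's uniform bullet
lemma bullet_collapse {line : List Char} {c : Char} {cs : List Char}
    (h : PySem.Chars.strip line = c :: cs)
    (hdash : PySem.Chars.startswith (c :: cs) ['-'] = false)
    (hstar : PySem.Chars.startswith (c :: cs) ['*'] = false) :
    c :: cs = PySem.Chars.strip ((c :: cs).dropWhile pvBulletCharsA) := by
  have hnsp := strip_head_not_space h
  have hc : pvBulletCharsA c = false := by
    simp only [PySem.Chars.startswith, List.isPrefixOf] at hdash hstar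
    simp only [pvBulletCharsA]
    have hsp : (c == ' ') = false := by
      cases hcc : c == ' '
      · rfl
      · exfalso; rw [eq_of_beq hcc] at hnsp; exact absurd hnsp (by decide)
    simp_all
    exact ⟨fun e => hdash e.symm, fun e => hstar e.symm⟩
  rw [List.dropWhile_cons_of_neg (by simp [hc]), ← h, strip_idem, h]

-- padFlush: with a section open and no bullet yet, A's pending pad decision
-- (head of the rest of pass1) agrees with B's state (true, false)
lemma pvPadFlush : ∀ (lines : List (List Char)) (s : List Char), s ∈ pvSectionsA →
    (if PySem.Chars.startswith (PySem.Chars.strip ((pvPass1A (some s) lines).headD [])) ['-'] = true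
      then pvLoopB true true lines
      else pvNotSpecB :: pvLoopB true true lines) = pvLoopB true false lines := by
  intro lines
  induction lines with
  | nil =>
    intro s hs
    simp [pvPass1A, pvLoopB]
    decide
  | cons line rest ih =>
    intro s hs
    obtain ⟨hne, -, -⟩ := section_props hs
    cases hsec : pvIsSectionA line with
    | some h =>
      have hmem := mem_of_isSection_some hsec
      obtain ⟨hne', hstrip, hnd⟩ := section_props hmem
      simp only [pvPass1A, hsec, List.headD_cons, pvLoopB, pvFind_eq_isSection,
        Bool.and_self, Bool.not_true, Bool.and_false, Bool.not_false]
      rw [hnd]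
      simp
    | none =>
      have htru : (some s).getD ([] : List Char) ≠ [] := by simpa using hne
      cases hstr : PySem.Chars.strip line with
      | nil =>
        simp only [pvPass1A, hsec, pvLoopB, hstr, Option.getD_some, if_pos hne, ite_true]
        exact ih s hs
      | cons c cs' =>
        have hbul : ∃ z, pvPass1A (some s) (line :: rest)
            = ('-' :: ' ' :: z) :: pvPass1A (some s) rest := by
          by_cases hbr : (PySem.Chars.startswith (c :: cs') ['-']
              || PySem.Chars.startswith (c :: cs') ['*']) = true
          · refine ⟨PySem.Chars.strip ((c :: cs').dropWhile pvBulletCharsA), ?_⟩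
            simp only [pvPass1A, hsec, Option.getD_some, if_pos hne, hstr]
            simp [hbr]
          · simp only [Bool.or_eq_true, not_or, Bool.not_eq_true] at hbr
            refine ⟨c :: cs', ?_⟩
            simp only [pvPass1A, hsec, Option.getD_some, if_pos hne, hstr, hbr.1, hbr.2]
            simp
        obtain ⟨z, hz⟩ := hbul
        rw [hz, List.headD_cons, if_pos (startswith_strip_dash _)]
        -- both sides are B's loop on (line :: rest) with has_bullet irrelevant here
        simp only [pvLoopB, pvFind_eq_isSection, hsec]
        simp [hstr]

-- mid-section: pass2 ∘ pass1 from an open, already-bulleted section = B's loop (true, true)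
lemma pvMidSection : ∀ (lines : List (List Char)) (s : List Char), s ∈ pvSectionsA →
    pvPass2A (pvPass1A (some s) lines) = pvLoopB true true lines := by
  intro lines
  induction lines with
  | nil => intro s hs; rfl
  | cons line rest ih =>
    intro s hs
    obtain ⟨hne, -, -⟩ := section_props hs
    cases hsec : pvIsSectionA line with
    | some h =>
      have hmem := mem_of_isSection_some hsec
      simp only [pvPass1A, hsec]
      simp only [pvPass2A, if_pos hmem]
      rw [ih h hmem]
      have hp := pvPadFlush rest h hmem
      simp only [pvLoopB, pvFind_eq_isSection, hsec]
      by_cases hc : PySem.Chars.startswith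
          (PySem.Chars.strip ((pvPass1A (some h) rest).headD [])) ['-'] = true
      · rw [if_pos hc] at hp ⊢
        rw [hp]; simp
      · rw [if_neg hc] at hp ⊢
        rw [show pvNotSpecA = pvNotSpecB from rfl, hp]; simp
    | none =>
      cases hstr : PySem.Chars.strip line with
      | nil =>
        simp only [pvPass1A, hsec, Option.getD_some, if_pos hne, hstr]
        rw [if_pos trivial]
        rw [ih s hs]
        simp only [pvLoopB, pvFind_eq_isSection, hsec]
        simp [hstr]
      | cons c cs' =>
        have hbul : ∃ z, pvPass1A (some s) (line :: rest)
            = ('-' :: ' ' :: z) :: pvPass1A (some s) rest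
            ∧ ('-' :: ' ' :: z)
              = '-' :: ' ' :: PySem.Chars.strip ((c :: cs').dropWhile pvBulletCharsB) := by
          by_cases hbr : (PySem.Chars.startswith (c :: cs') ['-']
              || PySem.Chars.startswith (c :: cs') ['*']) = true
          · refine ⟨PySem.Chars.strip ((c :: cs').dropWhile pvBulletCharsA), ?_, rfl⟩
            simp only [pvPass1A, hsec, Option.getD_some, if_pos hne, hstr]
            simp [hbr]
          · simp only [Bool.or_eq_true, not_or, Bool.not_eq_true] at hbr
            refine ⟨c :: cs', ?_, ?_⟩
            · simp only [pvPass1A, hsec, Option.getD_some, if_pos hne, hstr, hbr.1, hbr.2]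
              simp
            · have := bullet_collapse hstr hbr.1 hbr.2
              exact congrArg (fun t => '-' :: ' ' :: t) this
        obtain ⟨z, hz, hzB⟩ := hbul
        rw [hz]
        simp only [pvPass2A, if_neg (bullet_not_mem z)]
        rw [ih s hs]
        simp only [pvLoopB, pvFind_eq_isSection, hsec]
        simp only [hstr, List.cons_ne_nil, ite_false, ite_true]
        simp [← hzB]

-- top level: before any section
lemma pvTop : ∀ lines : List (List Char),
    pvPass2A (pvPass1A none lines) = pvLoopB false true lines := by
  intro lines
  induction lines with
  | nil => rfl
  | cons line rest ih =>
    cases hsec : pvIsSectionA line with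
    | some h =>
      have hmem := mem_of_isSection_some hsec
      simp only [pvPass1A, hsec]
      simp only [pvPass2A, if_pos hmem]
      rw [pvMidSection rest h hmem]
      have hp := pvPadFlush rest h hmem
      simp only [pvLoopB, pvFind_eq_isSection, hsec]
      by_cases hc : PySem.Chars.startswith
          (PySem.Chars.strip ((pvPass1A (some h) rest).headD [])) ['-'] = true
      · rw [if_pos hc] at hp ⊢
        rw [hp]; simp
      · rw [if_neg hc] at hp ⊢
        rw [show pvNotSpecA = pvNotSpecB from rfl, hp]; simp
    | none =>
      have hf : ¬((none : Option (List Char)).getD [] ≠ []) := by simp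
      simp only [pvPass1A, hsec, if_neg hf]
      simp only [pvPass2A, if_neg (not_mem_of_isSection_none hsec)]
      rw [ih]
      simp only [pvLoopB, pvFind_eq_isSection, hsec]
      simp

-- ===== VERDICT (by name: the statement is the Claim_ definition above) =====
theorem ensure_safety_py_spec : Claim_equal_ensure_safety_py := by
  unfold Claim_equal_ensure_safety_py
  intro answer _
  unfold Spec_ensure_safety_py ensure_safety_py ensure_safety_py_alt
  have hsec : pvSectionsB = pvSectionsA := rfl
  rw [hsec]
  cases h : pvSectionsA.all (fun s => PySem.Chars.isIn (PySem.Chars.lower s)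
      (PySem.Chars.lower answer.toList)) <;>
    simp [h, pvCleanTextA, pvTop]
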